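-- pv_equiv track=rewrite | github.com/techstar9797/Parts | fff_gradio_app.py | _categories_compatible
-- ===== SOURCE A (Python) =====
-- def _categories_compatible(cat1: str, cat2: str) -> bool:
--     """Check if categories are compatible"""
--     compatible_groups = [
--         ["OpAmp", "Comparator"],
--         ["LDO", "Linear Regulator"],
--         ["MOSFET", "Transistor"],
--         ["Resistor", "Resistor Array"]
--     ]
--
--     for group in compatible_groups:
--         if cat1 in group and cat2 in group:
--             return True
--     return False
-- ===== SOURCE B (Python) =====
-- def _categories_compatible(cat1: str, cat2: str) -> bool:
--     """Check if categories are compatible"""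
--     category_to_group = {
--         "OpAmp": 0, "Comparator": 0,
--         "LDO": 1, "Linear Regulator": 1,
--         "MOSFET": 2, "Transistor": 2,
--         "Resistor": 3, "Resistor Array": 3,
--     }
--     return cat1 in category_to_group and category_to_group[cat1] == category_to_group.get(cat2)
-- ===== Notes on version B (the rewrite author's own statement) =====
-- stated objective: idiomatic
-- what changed: Replaces the per-call scan over group lists (two membership scans per group) by a flat category-to-group-id dict, so the decision is a loop-free pair of dict lookups ('cat1 in table and table[cat1] == table.get(cat2)').
import Mathlib
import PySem

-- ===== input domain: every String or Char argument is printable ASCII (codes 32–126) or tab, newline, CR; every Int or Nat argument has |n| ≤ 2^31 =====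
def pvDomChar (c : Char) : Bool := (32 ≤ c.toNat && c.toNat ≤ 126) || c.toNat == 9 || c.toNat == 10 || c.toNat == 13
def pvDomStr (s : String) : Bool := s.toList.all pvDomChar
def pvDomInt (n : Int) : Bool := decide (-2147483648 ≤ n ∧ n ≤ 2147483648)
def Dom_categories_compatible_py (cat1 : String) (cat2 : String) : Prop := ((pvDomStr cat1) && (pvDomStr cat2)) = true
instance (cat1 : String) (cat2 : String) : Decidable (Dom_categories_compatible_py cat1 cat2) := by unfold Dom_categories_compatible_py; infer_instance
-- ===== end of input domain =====

-- B replaces A's per-call scan over the group lists (two membership scans per group) by a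
-- flat category→group-id dict literal, so the decision is a loop-free pair of lookups (idiomatic).

-- ===== PORT A =====
def pvCompatGroups : List (List String) :=
  [["OpAmp", "Comparator"], ["LDO", "Linear Regulator"],
   ["MOSFET", "Transistor"], ["Resistor", "Resistor Array"]]

-- the 'for group in compatible_groups: if cat1 in group and cat2 in group: return True' loop
def pvScanGroups : List (List String) → String → String → Bool
  | [], _, _ => false
  | g :: rest, c1, c2 =>
    if g.contains c1 && g.contains c2 then true else pvScanGroups rest c1 c2

def categories_compatible_py (cat1 : String) (cat2 : String) : Bool :=
  pvScanGroups pvCompatGroups cat1 cat2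

-- ===== PORT B =====
-- the category_to_group dict literal
def pvCatTable : PySem.Dict String Int :=
  PySem.Dict.ofList
    [("OpAmp", 0), ("Comparator", 0), ("LDO", 1), ("Linear Regulator", 1),
     ("MOSFET", 2), ("Transistor", 2), ("Resistor", 3), ("Resistor Array", 3)]

-- 'cat1 in category_to_group and category_to_group[cat1] == category_to_group.get(cat2)'
def categories_compatible_py_alt (cat1 : String) (cat2 : String) : Bool :=
  match pvCatTable.get? cat1 with
  | none => false
  | some v => pvCatTable.get? cat2 == some v

-- ===== PRECONDITION & SPEC =====
def Spec_categories_compatible_py (cat1 : String) (cat2 : String) (out : Bool) : Prop := out = categories_compatible_py_alt cat1 cat2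
instance (cat1 : String) (cat2 : String) (out : Bool) : Decidable (Spec_categories_compatible_py cat1 cat2 out) := by unfold Spec_categories_compatible_py; infer_instance

-- ===== CLAIM (what is proved, stated in full; the proofs are below) =====
def Claim_equal_categories_compatible_py : Prop := ∀ (cat1 : String) (cat2 : String), Dom_categories_compatible_py cat1 cat2 → Spec_categories_compatible_py cat1 cat2 (categories_compatible_py cat1 cat2)

-- ===== LEMMAS AND PROOFS =====

-- the dict literal, as the plain association list it evaluates to
lemma pvTableItems : pvCatTable = PySem.Dict.mk
    [("OpAmp", (0:Int)), ("Comparator", 0), ("LDO", 1), ("Linear Regulator", 1),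
     ("MOSFET", 2), ("Transistor", 2), ("Resistor", 3), ("Resistor Array", 3)] := by
  rfl

-- closed-form characterisation of a lookup in the table
lemma pvTableGet (c : String) : pvCatTable.get? c =
    (if c = "OpAmp" then some 0 else if c = "Comparator" then some 0
     else if c = "LDO" then some 1 else if c = "Linear Regulator" then some 1
     else if c = "MOSFET" then some 2 else if c = "Transistor" then some 2
     else if c = "Resistor" then some 3 else if c = "Resistor Array" then some (3:Int)
     else none) := by
  by_cases h1 : c = "OpAmp"; · subst h1; decide
  by_cases h2 : c = "Comparator"; · subst h2; decide
  by_cases h3 : c = "LDO"; · subst h3; decide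
  by_cases h4 : c = "Linear Regulator"; · subst h4; decide
  by_cases h5 : c = "MOSFET"; · subst h5; decide
  by_cases h6 : c = "Transistor"; · subst h6; decide
  by_cases h7 : c = "Resistor"; · subst h7; decide
  by_cases h8 : c = "Resistor Array"; · subst h8; decide
  have n1 : ("OpAmp" == c) = false := beq_eq_false_iff_ne.mpr (Ne.symm h1)
  have n2 : ("Comparator" == c) = false := beq_eq_false_iff_ne.mpr (Ne.symm h2)
  have n3 : ("LDO" == c) = false := beq_eq_false_iff_ne.mpr (Ne.symm h3)
  have n4 : ("Linear Regulator" == c) = false := beq_eq_false_iff_ne.mpr (Ne.symm h4)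
  have n5 : ("MOSFET" == c) = false := beq_eq_false_iff_ne.mpr (Ne.symm h5)
  have n6 : ("Transistor" == c) = false := beq_eq_false_iff_ne.mpr (Ne.symm h6)
  have n7 : ("Resistor" == c) = false := beq_eq_false_iff_ne.mpr (Ne.symm h7)
  have n8 : ("Resistor Array" == c) = false := beq_eq_false_iff_ne.mpr (Ne.symm h8)
  rw [pvTableItems]
  simp [PySem.Dict.get?, n1, n2, n3, n4, n5, n6, n7, n8, h1, h2, h3, h4, h5, h6, h7, h8]

-- every string is one of the 8 known categories, or none of them
lemma pvClassify (c : String) :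
    c = "OpAmp" ∨ c = "Comparator" ∨ c = "LDO" ∨ c = "Linear Regulator" ∨
    c = "MOSFET" ∨ c = "Transistor" ∨ c = "Resistor" ∨ c = "Resistor Array" ∨
    (c ≠ "OpAmp" ∧ c ≠ "Comparator" ∧ c ≠ "LDO" ∧ c ≠ "Linear Regulator" ∧
     c ≠ "MOSFET" ∧ c ≠ "Transistor" ∧ c ≠ "Resistor" ∧ c ≠ "Resistor Array") := by
  by_cases h1 : c = "OpAmp"; · exact Or.inl h1
  by_cases h2 : c = "Comparator"; · exact Or.inr (Or.inl h2)
  by_cases h3 : c = "LDO"; · exact Or.inr (Or.inr (Or.inl h3))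
  by_cases h4 : c = "Linear Regulator"; · exact Or.inr (Or.inr (Or.inr (Or.inl h4)))
  by_cases h5 : c = "MOSFET"; · exact Or.inr (Or.inr (Or.inr (Or.inr (Or.inl h5))))
  by_cases h6 : c = "Transistor"; · exact Or.inr (Or.inr (Or.inr (Or.inr (Or.inr (Or.inl h6)))))
  by_cases h7 : c = "Resistor"; · exact Or.inr (Or.inr (Or.inr (Or.inr (Or.inr (Or.inr (Or.inl h7))))))
  by_cases h8 : c = "Resistor Array"
  · exact Or.inr (Or.inr (Or.inr (Or.inr (Or.inr (Or.inr (Or.inr (Or.inl h8)))))))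
  · exact Or.inr (Or.inr (Or.inr (Or.inr (Or.inr (Or.inr (Or.inr (Or.inr
      ⟨h1, h2, h3, h4, h5, h6, h7, h8⟩)))))))

-- ===== VERDICT (by name: the statement is the Claim_ definition above) =====
theorem categories_compatible_py_spec : Claim_equal_categories_compatible_py := by
  intro c1 c2 _
  unfold Spec_categories_compatible_py categories_compatible_py_alt
  rw [pvTableGet c1, pvTableGet c2]
  rcases pvClassify c1 with h|h|h|h|h|h|h|h|h <;>
    rcases pvClassify c2 with g|g|g|g|g|g|g|g|g
  all_goals
    ((try subst h); (try subst g);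
     (try obtain ⟨a1, a2, a3, a4, a5, a6, a7, a8⟩ := h);
     (try obtain ⟨b1, b2, b3, b4, b5, b6, b7, b8⟩ := g);
     first
       | decide
       | simp [categories_compatible_py, pvScanGroups, pvCompatGroups, *])
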